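-- pv_equiv track=rewrite | github.com/LeonardoLordelloFontes/LA2 | Treino1/robot.py | robot
-- ===== SOURCE A (Python) =====
-- def robot(comandos):
--     l = []
--     dir = ((0,1),(1,0),(0,-1),(-1,0))
--     pos_dir = 0
--     pos = [0,0]
--     path = []
--     for comando in comandos:
--         path.append(tuple(pos))
--         if comando == 'A':
--             pos[0] += dir[pos_dir % 4][0]
--             pos[1] += dir[pos_dir % 4][1]
--
--         elif comando == 'E':
--             pos_dir -= 1
--
--         elif comando == 'D':
--             pos_dir += 1
--
--         elif comando == 'H':
--             l.append((min([x[0] for x in path]),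
--                       min([y[1] for y in path]),
--                       max([x[0] for x in path]),
--                       max([y[1] for y in path])))
--             pos_dir = 0
--             pos = [0,0]
--             path.clear()
--
--     return l
-- ===== SOURCE B (Python) =====
-- def robot(comandos):
--     res = []
--     pos_dir = 0
--     x = y = 0
--     fresh = True
--     min_x = min_y = max_x = max_y = 0
--     for c in comandos:
--         # fold the current position into the running bounds of this segment
--         if fresh:
--             min_x = max_x = x
--             min_y = max_y = y
--             fresh = False
--         else:
--             min_x = min(min_x, x)
--             min_y = min(min_y, y)
--             max_x = max(max_x, x)
--             max_y = max(max_y, y)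
--         if c == 'A':
--             m = pos_dir % 4
--             if m == 0:
--                 y += 1
--             elif m == 1:
--                 x += 1
--             elif m == 2:
--                 y -= 1
--             else:
--                 x -= 1
--         elif c == 'E':
--             pos_dir -= 1
--         elif c == 'D':
--             pos_dir += 1
--         elif c == 'H':
--             res.append((min_x, min_y, max_x, max_y))
--             pos_dir = 0
--             x = y = 0
--             fresh = True
--     return res
-- ===== Notes on version B (the rewrite author's own statement) =====
-- stated objective: alternative
-- what changed: B drops the per-segment path list entirely and maintains four running min/max scalars with a fresh flag, folding the current position into the bounds before each command instead of recording positions and scanning them at every 'H'.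
import Mathlib
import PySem

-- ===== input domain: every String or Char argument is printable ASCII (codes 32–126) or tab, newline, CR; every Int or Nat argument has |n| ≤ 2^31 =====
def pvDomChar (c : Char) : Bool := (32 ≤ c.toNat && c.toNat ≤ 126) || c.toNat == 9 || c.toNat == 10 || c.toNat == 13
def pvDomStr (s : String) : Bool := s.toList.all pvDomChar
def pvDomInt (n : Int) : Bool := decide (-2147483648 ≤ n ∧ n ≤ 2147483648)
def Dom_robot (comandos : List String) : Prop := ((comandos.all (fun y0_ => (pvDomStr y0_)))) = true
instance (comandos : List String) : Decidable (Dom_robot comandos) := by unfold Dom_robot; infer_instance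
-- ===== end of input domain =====

-- B replaces A's per-segment position list (scanned four times at every 'H') by four
-- running min/max scalars with a per-segment fresh flag: same output, O(1) extra space.


-- ===== PORT A =====
-- dir = ((0,1),(1,0),(0,-1),(-1,0))
def robotDirs : List (Int × Int) := [(0,1),(1,0),(0,-1),(-1,0)]

-- state: (l, pos_dir, pos, path)
def robotStep (st : List (Int × Int × Int × Int) × Int × (Int × Int) × List (Int × Int))
    (comando : String) : List (Int × Int × Int × Int) × Int × (Int × Int) × List (Int × Int) :=
  let (l, pos_dir, pos, path0) := st
  let path := path0 ++ [pos]          -- path.append(tuple(pos))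
  if comando = "A" then
    -- dir[pos_dir % 4] is always in range (0 ≤ pos_dir % 4 < 4), so .getD (0,0) is unreachable
    let d := (PySem.List.pyGet? robotDirs (PySem.Int.mod pos_dir 4)).getD (0, 0)
    (l, pos_dir, (pos.1 + d.1, pos.2 + d.2), path)
  else if comando = "E" then (l, pos_dir - 1, pos, path)
  else if comando = "D" then (l, pos_dir + 1, pos, path)
  else if comando = "H" then
    -- min/max of a nonempty list (path was just appended to), so .getD 0 is unreachable
    (l ++ [((PySem.List.min? (path.map (fun p => p.1)) (fun v => v)).getD 0,
            (PySem.List.min? (path.map (fun p => p.2)) (fun v => v)).getD 0,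
            (PySem.List.max? (path.map (fun p => p.1)) (fun v => v)).getD 0,
            (PySem.List.max? (path.map (fun p => p.2)) (fun v => v)).getD 0)],
     0, (0, 0), [])
  else (l, pos_dir, pos, path)

def robot (comandos : List String) : List (Int × Int × Int × Int) :=
  (comandos.foldl robotStep ([], 0, (0, 0), [])).1

-- ===== PORT B =====
-- state: (res, pos_dir, x, y, fresh, min_x, min_y, max_x, max_y)
def robotAltStep
    (st : List (Int × Int × Int × Int) × Int × Int × Int × Bool × Int × Int × Int × Int)
    (c : String) : List (Int × Int × Int × Int) × Int × Int × Int × Bool × Int × Int × Int × Int :=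
  let (res, pos_dir, x, y, fresh, mnx, mny, mxx, mxy) := st
  -- fold the current position into the running bounds of this segment
  let (mnx, mny, mxx, mxy) :=
    if fresh then (x, y, x, y) else (min mnx x, min mny y, max mxx x, max mxy y)
  if c = "A" then
    let m := PySem.Int.mod pos_dir 4
    if m = 0 then (res, pos_dir, x, y + 1, false, mnx, mny, mxx, mxy)
    else if m = 1 then (res, pos_dir, x + 1, y, false, mnx, mny, mxx, mxy)
    else if m = 2 then (res, pos_dir, x, y - 1, false, mnx, mny, mxx, mxy)
    else (res, pos_dir, x - 1, y, false, mnx, mny, mxx, mxy)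
  else if c = "E" then (res, pos_dir - 1, x, y, false, mnx, mny, mxx, mxy)
  else if c = "D" then (res, pos_dir + 1, x, y, false, mnx, mny, mxx, mxy)
  else if c = "H" then (res ++ [(mnx, mny, mxx, mxy)], 0, 0, 0, true, mnx, mny, mxx, mxy)
  else (res, pos_dir, x, y, false, mnx, mny, mxx, mxy)

def robot_alt (comandos : List String) : List (Int × Int × Int × Int) :=
  (comandos.foldl robotAltStep ([], 0, 0, 0, true, 0, 0, 0, 0)).1

-- ===== PRECONDITION & SPEC =====
def Spec_robot (comandos : List String) (out : List (Int × Int × Int × Int)) : Prop := out = robot_alt comandos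
instance (comandos : List String) (out : List (Int × Int × Int × Int)) : Decidable (Spec_robot comandos out) := by unfold Spec_robot; infer_instance

-- ===== CLAIM (what is proved, stated in full; the proofs are below) =====
def Claim_equal_robot : Prop := ∀ (comandos : List String), Dom_robot comandos → Spec_robot comandos (robot comandos)

-- ===== LEMMAS AND PROOFS =====

-- relation between A's fold state and B's fold state
def robotRel (sa : List (Int × Int × Int × Int) × Int × (Int × Int) × List (Int × Int))
    (sb : List (Int × Int × Int × Int) × Int × Int × Int × Bool × Int × Int × Int × Int) : Prop :=
  sb.1 = sa.1 ∧ sb.2.1 = sa.2.1 ∧ sb.2.2.1 = sa.2.2.1.1 ∧ sb.2.2.2.1 = sa.2.2.1.2 ∧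
  (sb.2.2.2.2.1 = true ↔ sa.2.2.2 = []) ∧
  (∀ p ps, sa.2.2.2 = p :: ps →
    sb.2.2.2.2.2.1 = ps.foldl (fun m q => min m q.1) p.1 ∧
    sb.2.2.2.2.2.2.1 = ps.foldl (fun m q => min m q.2) p.2 ∧
    sb.2.2.2.2.2.2.2.1 = ps.foldl (fun m q => max m q.1) p.1 ∧
    sb.2.2.2.2.2.2.2.2 = ps.foldl (fun m q => max m q.2) p.2)

theorem robotStep_rel_core (l : List (Int × Int × Int × Int)) (pd x y : Int)
    (path : List (Int × Int)) (fresh : Bool) (mnx mny mxx mxy : Int)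
    (h5 : fresh = true ↔ path = [])
    (h6 : ∀ p ps, path = p :: ps →
      mnx = ps.foldl (fun m q => min m q.1) p.1 ∧
      mny = ps.foldl (fun m q => min m q.2) p.2 ∧
      mxx = ps.foldl (fun m q => max m q.1) p.1 ∧
      mxy = ps.foldl (fun m q => max m q.2) p.2)
    (c : String) :
    robotRel (robotStep (l, pd, (x, y), path) c)
      (robotAltStep (l, pd, x, y, fresh, mnx, mny, mxx, mxy) c) := by
  -- the merged bounds
  set nb : Int × Int × Int × Int :=
    (if fresh = true then (x, y, x, y) else (min mnx x, min mny y, max mxx x, max mxy y))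
    with hnb
  -- (K1) merged bounds = component folds over path ++ [(x,y)]
  have K1 : ∀ p ps, path ++ [(x, y)] = p :: ps →
      nb.1 = ps.foldl (fun m q => min m q.1) p.1 ∧
      nb.2.1 = ps.foldl (fun m q => min m q.2) p.2 ∧
      nb.2.2.1 = ps.foldl (fun m q => max m q.1) p.1 ∧
      nb.2.2.2 = ps.foldl (fun m q => max m q.2) p.2 := by
    intro p ps hps
    cases hpath : path with
    | nil =>
        have hfr : fresh = true := h5.mpr hpath
        rw [hpath] at hps
        cases hps
        simp [hnb, hfr]
    | cons a as =>
        have hfr : fresh = false := by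
          cases fresh
          · rfl
          · exact absurd (h5.mp rfl) (by simp [hpath])
        obtain ⟨e1, e2, e3, e4⟩ := h6 a as hpath
        rw [hpath] at hps
        cases hps
        simp [hnb, hfr, e1, e2, e3, e4, List.foldl_append]
  have hne : path ++ [(x, y)] ≠ [] := by simp
  obtain ⟨q, qs, hq⟩ := List.exists_cons_of_ne_nil hne
  obtain ⟨k1, k2, k3, k4⟩ := K1 q qs hq
  -- (K2) A's min?/max? over the nonempty list = the merged bounds
  have hminx : (PySem.List.min? ((path ++ [(x, y)]).map (fun p => p.1)) (fun v => v)).getD 0 = nb.1 := by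
    rw [hq, k1]; simp [PySem.List.min?_id_cons, List.foldl_map]
  have hminy : (PySem.List.min? ((path ++ [(x, y)]).map (fun p => p.2)) (fun v => v)).getD 0 = nb.2.1 := by
    rw [hq, k2]; simp [PySem.List.min?_id_cons, List.foldl_map]
  have hmaxx : (PySem.List.max? ((path ++ [(x, y)]).map (fun p => p.1)) (fun v => v)).getD 0 = nb.2.2.1 := by
    rw [hq, k3]; simp [PySem.List.max?_id_cons, List.foldl_map]
  have hmaxy : (PySem.List.max? ((path ++ [(x, y)]).map (fun p => p.2)) (fun v => v)).getD 0 = nb.2.2.2 := by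
    rw [hq, k4]; simp [PySem.List.max?_id_cons, List.foldl_map]
  by_cases hA : c = "A"
  · -- the direction lookup in A matches B's branch on pos_dir % 4
    have hm0 : (0 : Int) ≤ PySem.Int.mod pd 4 := by
      rw [PySem.Int.mod_eq_emod_of_pos (by norm_num)]; exact Int.emod_nonneg pd (by norm_num)
    have hm4 : PySem.Int.mod pd 4 < 4 := by
      rw [PySem.Int.mod_eq_emod_of_pos (by norm_num)]; exact Int.emod_lt_of_pos pd (by norm_num)
    unfold robotRel
    simp only [robotStep, robotAltStep, if_pos hA, ← hnb]
    rcases (by omega : PySem.Int.mod pd 4 = 0 ∨ PySem.Int.mod pd 4 = 1 ∨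
        PySem.Int.mod pd 4 = 2 ∨ PySem.Int.mod pd 4 = 3) with h | h | h | h <;>
      · rw [h]
        refine ⟨rfl, rfl,
          by norm_num [robotDirs, PySem.List.pyGet?, PySem.List.pyIdx?, Int.toNat] <;> omega,
          by norm_num [robotDirs, PySem.List.pyGet?, PySem.List.pyIdx?, Int.toNat] <;> omega,
          by simp [hq], ?_⟩
        intro p ps hps
        rw [hq] at hps; cases hps
        exact ⟨k1, k2, k3, k4⟩
  by_cases hE : c = "E"
  · unfold robotRel
    simp only [robotStep, robotAltStep, if_neg hA, if_pos hE, ← hnb]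
    refine ⟨by simp, by simp, by simp, by simp, by simp [hq], ?_⟩
    intro p ps hps
    rw [hq] at hps; cases hps
    exact ⟨k1, k2, k3, k4⟩
  by_cases hD : c = "D"
  · unfold robotRel
    simp only [robotStep, robotAltStep, if_neg hA, if_neg hE, if_pos hD, ← hnb]
    refine ⟨by simp, by simp, by simp, by simp, by simp [hq], ?_⟩
    intro p ps hps
    rw [hq] at hps; cases hps
    exact ⟨k1, k2, k3, k4⟩
  by_cases hH : c = "H"
  · unfold robotRel
    simp only [robotStep, robotAltStep, if_neg hA, if_neg hE, if_neg hD, if_pos hH, ← hnb]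
    refine ⟨?_, by simp, by simp, by simp, by simp, by intro p ps h; cases h⟩
    rw [hminx, hminy, hmaxx, hmaxy]
  · unfold robotRel
    simp only [robotStep, robotAltStep, if_neg hA, if_neg hE, if_neg hD, if_neg hH, ← hnb]
    refine ⟨by simp, by simp, by simp, by simp, by simp [hq], ?_⟩
    intro p ps hps
    rw [hq] at hps; cases hps
    exact ⟨k1, k2, k3, k4⟩

theorem robotRel_foldl (cs : List String)
    (sa : List (Int × Int × Int × Int) × Int × (Int × Int) × List (Int × Int))
    (sb : List (Int × Int × Int × Int) × Int × Int × Int × Bool × Int × Int × Int × Int)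
    (h : robotRel sa sb) : robotRel (cs.foldl robotStep sa) (cs.foldl robotAltStep sb) := by
  induction cs generalizing sa sb with
  | nil => exact h
  | cons c cs ih =>
      obtain ⟨l, pd, ⟨px, py⟩, path⟩ := sa
      obtain ⟨res, pd2, x, y, fresh, mnx, mny, mxx, mxy⟩ := sb
      obtain ⟨h1, h2, h3, h4, h5, h6⟩ := h
      simp only at h1 h2 h3 h4 h5 h6
      subst h1 h2 h3 h4
      exact ih _ _ (robotStep_rel_core _ _ _ _ _ _ _ _ _ _ h5 h6 c)

-- ===== VERDICT (by name: the statement is the Claim_ definition above) =====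
theorem robot_spec : Claim_equal_robot := by
  intro comandos _
  have h := robotRel_foldl comandos ([], 0, (0, 0), []) ([], 0, 0, 0, true, 0, 0, 0, 0)
    ⟨rfl, rfl, rfl, rfl, by simp, by intro p ps h; cases h⟩
  exact h.1.symm
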